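-- pv_equiv track=rewrite | github.com/asheshghosh/Genomic-Data-Science | Boyer_Moore.py | optimized_small_l_prime_array
-- ===== SOURCE A (Python) =====
-- def optimized_small_l_prime_array(n):
--     """
--     Compute the small l' array from the N-array n.
--
--     small_l_prime[i] gives the length of the longest substring starting at i that is also a prefix.
--     """
--     m = len(n)
--     small_lp = [0] * m
--     for i in range(m):
--         if n[i] == i + 1:
--             small_lp[m - i - 1] = i + 1
--     for i in range(m - 2, -1, -1):
--         if small_lp[i] == 0:
--             small_lp[i] = small_lp[i + 1]
--     return small_lp
-- ===== SOURCE B (Python) =====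
-- def optimized_small_l_prime_array(n):
--     out = []
--     carry = 0
--     for i, v in enumerate(n):
--         if v == i + 1:
--             carry = i + 1
--         out.append(carry)
--     return out[::-1]
-- ===== Notes on version B (the rewrite author's own statement) =====
-- stated objective: simpler
-- what changed: Replaces the scatter pass plus right-to-left zero-fill pass over a preallocated array by a single forward enumerate loop carrying the nearest qualifying value (the last i+1 with n[i]==i+1) and reversing the collected carries.
import Mathlib
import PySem

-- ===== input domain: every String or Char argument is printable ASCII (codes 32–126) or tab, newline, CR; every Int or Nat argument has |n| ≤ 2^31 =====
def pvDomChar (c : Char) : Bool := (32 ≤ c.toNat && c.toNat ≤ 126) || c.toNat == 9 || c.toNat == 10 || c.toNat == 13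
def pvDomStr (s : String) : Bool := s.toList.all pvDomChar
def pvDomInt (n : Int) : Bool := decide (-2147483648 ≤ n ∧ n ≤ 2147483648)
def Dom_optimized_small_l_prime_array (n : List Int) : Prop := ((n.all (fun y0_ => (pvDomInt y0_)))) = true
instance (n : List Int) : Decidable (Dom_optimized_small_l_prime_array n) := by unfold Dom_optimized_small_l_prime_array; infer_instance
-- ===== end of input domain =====

-- B replaces A's scatter pass plus right-to-left zero-fill pass by a single forward
-- loop carrying the nearest qualifying value, reversed at the end (objective: simpler).


-- ===== PORT A =====
-- literal transliteration of A: scatter pass over range(m), then zero-fill pass over range(m-2,-1,-1)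
def optimized_small_l_prime_array (n : List Int) : List Int :=
  let m : Int := n.length
  let small_lp : List Int := List.replicate n.length (0 : Int)
  let small_lp :=
    (PySem.List.pyRange 0 m 1).foldl
      (fun acc i =>
        if PySem.List.pyGetD n i 0 == i + 1
        then PySem.List.pySetD acc (m - i - 1) (i + 1) else acc) small_lp
  (PySem.List.pyRange (m - 2) (-1) (-1)).foldl
    (fun acc i =>
      if PySem.List.pyGetD acc i 0 == 0
      then PySem.List.pySetD acc i (PySem.List.pyGetD acc (i + 1) 0) else acc) small_lp

-- ===== PORT B =====
-- literal transliteration of B: one forward pass over enumerate(n) carrying an accumulator,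
-- appending it each step, then out[::-1] (= reverse)
def optimized_small_l_prime_array_alt (n : List Int) : List Int :=
  let res :=
    (PySem.List.enumerate n 0).foldl
      (fun (st : Int × List Int) p =>
        let carry := if p.2 == p.1 + 1 then p.1 + 1 else st.1
        (carry, st.2 ++ [carry])) ((0 : Int), ([] : List Int))
  res.2.reverse

-- ===== PRECONDITION & SPEC =====
def Spec_optimized_small_l_prime_array (n : List Int) (out : List Int) : Prop := out = optimized_small_l_prime_array_alt n
instance (n : List Int) (out : List Int) : Decidable (Spec_optimized_small_l_prime_array n out) := by unfold Spec_optimized_small_l_prime_array; infer_instance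

-- ===== CLAIM (what is proved, stated in full; the proofs are below) =====
def Claim_equal_optimized_small_l_prime_array : Prop := ∀ (n : List Int), Dom_optimized_small_l_prime_array n → Spec_optimized_small_l_prime_array n (optimized_small_l_prime_array n)

-- ===== LEMMAS AND PROOFS =====

-- carry after processing elements 0..k of n: the last j <= k with n[j] = j+1 yields j+1, else 0
def carryAt (n : List Int) : Nat → Int
  | 0 => if n.getD 0 0 = 1 then 1 else 0
  | (k+1) => if n.getD (k+1) 0 = (k : Int) + 2 then (k : Int) + 2 else carryAt n k

theorem carryAt_append (xs : List Int) (x : Int) (k : Nat) (hk : k < xs.length) :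
    carryAt (xs ++ [x]) k = carryAt xs k := by
  induction k with
  | zero =>
    have h1 : (xs ++ [x]).getD 0 0 = xs.getD 0 0 := by
      rw [List.getD, List.getD, List.getElem?_append_left (by omega : 0 < xs.length)]
    simp only [carryAt, h1]
  | succ k ih =>
    have h1 : (xs ++ [x]).getD (k+1) 0 = xs.getD (k+1) 0 := by
      rw [List.getD, List.getD, List.getElem?_append_left hk]
    simp only [carryAt, h1, ih (by omega)]

theorem getD_append_self (xs : List Int) (x : Int) : (xs ++ [x]).getD xs.length 0 = x := by
  rw [List.getD, List.getElem?_append_right (le_refl _)]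
  simp

theorem alt_foldl_char (n : List Int) :
    (PySem.List.enumerate n 0).foldl
      (fun (st : Int × List Int) p =>
        let carry := if p.2 == p.1 + 1 then p.1 + 1 else st.1
        (carry, st.2 ++ [carry])) ((0 : Int), ([] : List Int))
    = ((if n.length = 0 then 0 else carryAt n (n.length - 1)),
       (List.range n.length).map (carryAt n)) := by
  induction n using List.reverseRecOn with
  | nil => simp [PySem.List.enumerate_nil]
  | append_singleton xs x ih =>
    rw [PySem.List.enumerate_append, List.foldl_append, ih]
    simp only [PySem.List.enumerate_cons, PySem.List.enumerate_nil, List.foldl_cons, List.foldl_nil]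
    have hmap : (List.range (xs.length + 1)).map (carryAt (xs ++ [x]))
        = (List.range xs.length).map (carryAt xs) ++ [carryAt (xs ++ [x]) xs.length] := by
      rw [List.range_succ, List.map_append]
      congr 1
      exact List.map_congr_left (fun k hk => carryAt_append xs x k (List.mem_range.mp hk))
    have hcarry : (if x == (0 + (xs.length : Int)) + 1 then (0 + (xs.length : Int)) + 1
        else (if xs.length = 0 then 0 else carryAt xs (xs.length - 1)))
        = carryAt (xs ++ [x]) xs.length := by
      cases hxs : xs.length with
      | zero =>
        have : xs = [] := List.eq_nil_of_length_eq_zero hxs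
        subst this
        simp [carryAt, List.getD, beq_iff_eq]
      | succ k =>
        have hklt : k < xs.length := by omega
        have hg : (xs ++ [x]).getD (k+1) 0 = x := by
          rw [← hxs]; exact getD_append_self xs x
        simp only [carryAt, hg, carryAt_append xs x k hklt, beq_iff_eq,
          Nat.add_sub_cancel, Nat.succ_ne_zero, if_false]
        have hc : ((0:Int) + (((k:Nat)+1 : Nat) : Int) + 1) = (k : Int) + 2 := by push_cast; ring
        rw [hc]
    rw [hcarry]
    simp [hmap]

theorem foldl_length_pres (l : List Int) (init : List Int)
    (f : List Int → Int → List Int) (h : ∀ acc i, (f acc i).length = acc.length) :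
    (l.foldl f init).length = init.length := by
  induction l generalizing init with
  | nil => rfl
  | cons a l ih => rw [List.foldl_cons, ih, h]

theorem getD_set_lt (A : List Int) (j : Nat) (v : Int) (pos : Nat) (hj : j < A.length) :
    (A.set j v).getD pos 0 = if j = pos then v else A.getD pos 0 := by
  rw [List.getD, List.getD, List.getElem?_set]
  by_cases h : j = pos
  · subst h
    simp [hj]
  · simp [h]

-- value at position pos after A's first (scatter) pass
def s1val (n : List Int) (pos : Nat) : Int :=
  if n.getD (n.length - 1 - pos) 0 = (n.length : Int) - pos then (n.length : Int) - pos else 0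

theorem pass1_length (n : List Int) (k : Int) :
    ((PySem.List.pyRange 0 k 1).foldl
      (fun acc i =>
        if PySem.List.pyGetD n i 0 == i + 1
        then PySem.List.pySetD acc ((n.length : Int) - i - 1) (i + 1) else acc)
      (List.replicate n.length (0 : Int))).length = n.length := by
  rw [foldl_length_pres]
  · exact List.length_replicate
  · intro acc i
    split_ifs
    · exact PySem.List.length_pySetD acc _ _
    · rfl

theorem pass1_char (n : List Int) (k : Nat) (hk : k ≤ n.length) :
    ∀ pos : Nat, pos < n.length →
      ((PySem.List.pyRange 0 k 1).foldl
        (fun acc i =>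
          if PySem.List.pyGetD n i 0 == i + 1
          then PySem.List.pySetD acc ((n.length : Int) - i - 1) (i + 1) else acc)
        (List.replicate n.length (0 : Int))).getD pos 0
      = (if n.length - 1 - pos < k ∧ n.getD (n.length - 1 - pos) 0 = (n.length : Int) - pos
         then (n.length : Int) - pos else 0) := by
  induction k with
  | zero =>
    intro pos hpos
    rw [PySem.List.pyRange_one_eq_nil (by norm_num), List.foldl_nil]
    rw [if_neg (by omega)]
    rw [List.getD, List.getElem?_replicate]
    split_ifs
    all_goals rfl
  | succ k ih =>
    intro pos hpos
    have hcast : (((k:Nat)+1 : Nat) : Int) = (k : Int) + 1 := by push_cast; ring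
    rw [hcast, PySem.List.pyRange_one_succ_right (by positivity), List.foldl_append,
      List.foldl_cons, List.foldl_nil]
    rw [PySem.List.pyGetD_natCast]
    have hlen : ((PySem.List.pyRange 0 (k:Int) 1).foldl
        (fun acc i =>
          if PySem.List.pyGetD n i 0 == i + 1
          then PySem.List.pySetD acc ((n.length : Int) - i - 1) (i + 1) else acc)
        (List.replicate n.length (0 : Int))).length = n.length := pass1_length n k
    by_cases hc : n.getD k 0 = (k : Int) + 1
    · rw [if_pos (by simpa [beq_iff_eq] using hc)]
      rw [show ((n.length : Int) - (k : Int) - 1) = (((n.length - 1 - k : Nat)) : Int) from by omega,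
        PySem.List.pySetD_natCast, getD_set_lt _ _ _ _ (by rw [hlen]; omega),
        ih (by omega) pos hpos]
      by_cases hp : n.length - 1 - k = pos
      · rw [if_pos hp]
        rw [if_pos ⟨by omega, by
          rw [show n.length - 1 - pos = k from by omega,
            show (n.length : Int) - (pos : Int) = (k : Int) + 1 from by omega]
          exact hc⟩]
        omega
      · rw [if_neg hp]
        by_cases h2 : n.length - 1 - pos < k ∧ n.getD (n.length - 1 - pos) 0 = (n.length : Int) - pos
        · rw [if_pos h2, if_pos ⟨by omega, h2.2⟩]
        · rw [if_neg h2, if_neg (fun h => h2 ⟨by omega, h.2⟩)]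
    · rw [if_neg (by simpa [beq_iff_eq] using hc), ih (by omega) pos hpos]
      by_cases hp : n.length - 1 - pos = k
      · rw [if_neg (by omega), if_neg (fun h => hc (by
          rw [show (k : Int) + 1 = (n.length : Int) - (pos : Int) from by omega,
            ← hp]
          exact h.2))]
      · by_cases h2 : n.length - 1 - pos < k ∧ n.getD (n.length - 1 - pos) 0 = (n.length : Int) - pos
        · rw [if_pos h2, if_pos ⟨by omega, h2.2⟩]
        · rw [if_neg h2, if_neg (fun h => h2 ⟨by omega, h.2⟩)]

theorem s1val_eq_carry_last (n : List Int) (h : n.length ≠ 0) :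
    s1val n (n.length - 1) = carryAt n 0 := by
  unfold s1val carryAt
  have h1 : n.length - 1 - (n.length - 1) = 0 := by omega
  have h2 : (n.length : Int) - (n.length - 1 : Nat) = 1 := by omega
  rw [h1, h2]

theorem pass2_length (j : Int) (acc : List Int) :
    ((PySem.List.pyRange j (-1) (-1)).foldl
      (fun acc i =>
        if PySem.List.pyGetD acc i 0 == 0
        then PySem.List.pySetD acc i (PySem.List.pyGetD acc (i + 1) 0) else acc) acc).length
    = acc.length := by
  rw [foldl_length_pres]
  intro acc i
  split_ifs
  · exact PySem.List.length_pySetD acc _ _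
  · rfl

theorem pass2_aux (n : List Int) (t : Nat) :
    ∀ (acc : List Int), (t : Int) - 1 ≤ (n.length : Int) - 2 → acc.length = n.length →
    (∀ pos : Nat, pos < n.length →
      acc.getD pos 0 = if (t : Int) - 1 < (pos : Int) then carryAt n (n.length - 1 - pos)
                       else s1val n pos) →
    ∀ pos : Nat, pos < n.length →
      ((PySem.List.pyRange ((t : Int) - 1) (-1) (-1)).foldl
        (fun acc i =>
          if PySem.List.pyGetD acc i 0 == 0
          then PySem.List.pySetD acc i (PySem.List.pyGetD acc (i + 1) 0) else acc) acc).getD pos 0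
      = carryAt n (n.length - 1 - pos) := by
  induction t with
  | zero =>
    intro acc _ _ hinv pos hpos
    rw [PySem.List.pyRange_neg_one_eq_nil (by norm_num), List.foldl_nil, hinv pos hpos,
      if_pos (by omega)]
  | succ t ih =>
    intro acc hle hlen hinv pos hpos
    have hcast : (((t:Nat)+1 : Nat) : Int) - 1 = (t : Int) := by push_cast; ring
    rw [hcast] at hinv
    rw [hcast, PySem.List.pyRange_neg_one_cons (by omega), List.foldl_cons]
    have htm : t + 2 ≤ n.length := by omega
    have hget_t : PySem.List.pyGetD acc (t : Int) 0 = s1val n t := by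
      rw [PySem.List.pyGetD_natCast, hinv t (by omega), if_neg (by omega)]
    have hget_t1 : PySem.List.pyGetD acc ((t : Int) + 1) 0 = carryAt n (n.length - 2 - t) := by
      have : ((t : Int) + 1) = ((t + 1 : Nat) : Int) := by push_cast; ring
      rw [this, PySem.List.pyGetD_natCast, hinv (t+1) (by omega), if_pos (by omega)]
      congr 1
      omega
    have hsucc : n.length - 1 - t = (n.length - 2 - t) + 1 := by omega
    have hc2 : ((n.length - 2 - t : Nat) : Int) + 2 = (n.length : Int) - t := by omega
    by_cases hz : s1val n t = 0
    · rw [if_pos (by simp [hget_t, hz])]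
      rw [PySem.List.pySetD_natCast, hget_t1]
      -- from s1val n t = 0: the scatter condition at t is false
      have hcond : ¬ (n.getD (n.length - 1 - t) 0 = (n.length : Int) - t) := by
        intro h
        rw [s1val, if_pos h] at hz
        omega
      have hcarry_eq : carryAt n (n.length - 1 - t) = carryAt n (n.length - 2 - t) := by
        rw [hsucc]
        simp only [carryAt]
        rw [if_neg (by rw [← hsucc, hc2]; exact hcond)]
      refine ih _ (by omega) (by rw [List.length_set]; exact hlen) (fun q hq => ?_) pos hpos
      rw [getD_set_lt _ _ _ _ (by omega)]
      by_cases hqt : t = q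
      · subst hqt
        rw [if_pos rfl, if_pos (by omega), hcarry_eq]
      · rw [if_neg hqt, hinv q hq]
        by_cases h1 : (t : Int) < (q : Int)
        · rw [if_pos h1, if_pos (by omega)]
        · rw [if_neg h1, if_neg (by omega)]
    · rw [if_neg (by simp [hget_t, beq_iff_eq]; exact hz)]
      have hcond : n.getD (n.length - 1 - t) 0 = (n.length : Int) - t := by
        by_contra h
        rw [s1val, if_neg h] at hz
        exact hz rfl
      have hval : s1val n t = (n.length : Int) - t := by rw [s1val, if_pos hcond]
      have hcarry_eq : carryAt n (n.length - 1 - t) = (n.length : Int) - t := by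
        rw [hsucc]
        simp only [carryAt]
        rw [if_pos (by rw [← hsucc, hc2]; exact hcond), hc2]
      refine ih _ (by omega) hlen (fun q hq => ?_) pos hpos
      rw [hinv q hq]
      by_cases hqt : t = q
      · subst hqt
        rw [if_neg (by omega), if_pos (by omega), hcarry_eq, hval]
      · by_cases h1 : (t : Int) < (q : Int)
        · rw [if_pos h1, if_pos (by omega)]
        · rw [if_neg h1, if_neg (by omega)]

theorem getElem_eq_getD (l : List Int) (i : Nat) (h : i < l.length) : l[i] = l.getD i 0 := by
  rw [List.getD, List.getElem?_eq_getElem h]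
  rfl

theorem pass1_eq_s1val (n : List Int) (pos : Nat) (hpos : pos < n.length) :
    (if n.length - 1 - pos < n.length ∧ n.getD (n.length - 1 - pos) 0 = (n.length : Int) - pos
     then (n.length : Int) - pos else 0) = s1val n pos := by
  unfold s1val
  by_cases hc : n.getD (n.length - 1 - pos) 0 = (n.length : Int) - pos
  · rw [if_pos ⟨by omega, hc⟩, if_pos hc]
  · rw [if_neg (fun h => hc h.2), if_neg hc]

-- ===== VERDICT (by name: the statement is the Claim_ definition above) =====
theorem optimized_small_l_prime_array_spec : Claim_equal_optimized_small_l_prime_array := by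
  intro n _
  unfold Spec_optimized_small_l_prime_array
  have halt : optimized_small_l_prime_array_alt n
      = ((List.range n.length).map (carryAt n)).reverse := by
    unfold optimized_small_l_prime_array_alt
    rw [alt_foldl_char]
  have hA : optimized_small_l_prime_array n
      = (PySem.List.pyRange ((n.length : Int) - 2) (-1) (-1)).foldl
          (fun acc i =>
            if PySem.List.pyGetD acc i 0 == 0
            then PySem.List.pySetD acc i (PySem.List.pyGetD acc (i + 1) 0) else acc)
          ((PySem.List.pyRange 0 (n.length : Int) 1).foldl
            (fun acc i =>
              if PySem.List.pyGetD n i 0 == i + 1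
              then PySem.List.pySetD acc ((n.length : Int) - i - 1) (i + 1) else acc)
            (List.replicate n.length (0 : Int))) := rfl
  rw [hA, halt]
  refine List.ext_getElem ?_ ?_
  · rw [pass2_length, pass1_length]
    simp
  · intro i h1 h2
    have hm : i < n.length := by rwa [pass2_length, pass1_length] at h1
    have hpos' : 0 < n.length := by omega
    have hinv : ∀ pos : Nat, pos < n.length →
        ((PySem.List.pyRange 0 (n.length : Int) 1).foldl
          (fun acc i =>
            if PySem.List.pyGetD n i 0 == i + 1
            then PySem.List.pySetD acc ((n.length : Int) - i - 1) (i + 1) else acc)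
          (List.replicate n.length (0 : Int))).getD pos 0
        = if ((n.length - 1 : Nat) : Int) - 1 < (pos : Int)
          then carryAt n (n.length - 1 - pos) else s1val n pos := by
      intro pos hpos
      rw [pass1_char n n.length le_rfl pos hpos, pass1_eq_s1val n pos hpos]
      by_cases hq : ((n.length - 1 : Nat) : Int) - 1 < (pos : Int)
      · rw [if_pos hq]
        rw [show pos = n.length - 1 from by omega,
          show n.length - 1 - (n.length - 1) = 0 from by omega]
        exact s1val_eq_carry_last n (by omega)
      · rw [if_neg hq]
    rw [getElem_eq_getD _ _ h1,
      show ((n.length : Int) - 2) = ((n.length - 1 : Nat) : Int) - 1 from by omega,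
      pass2_aux n (n.length - 1) _ (by omega) (pass1_length n _) hinv i hm,
      List.getElem_reverse]
    simp only [List.getElem_map, List.getElem_range, List.length_map, List.length_range]
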